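-- pv_equiv track=rewrite | github.com/doancuong357/KTTMDT | btth9.py | max_positive_sum_length
-- ===== SOURCE A (Python) =====
-- def max_positive_sum_length(arr):
--     max_sum = 0
--     current_sum = 0
--     max_len = 0
--     current_len = 0
--     for i in range(len(arr)):
--         if arr[i] > 0:
--             current_sum += arr[i]
--             current_len += 1
--             if current_sum > max_sum:
--                 max_sum = current_sum
--                 max_len = current_len
--             elif current_sum == max_sum and current_len > max_len:
--                 max_len = current_len
--         else:
--             current_sum = 0
--             current_len = 0
--     return max_len
-- ===== SOURCE B (Python) =====
-- def max_positive_sum_length(arr):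
--     # Phase 1: split arr into maximal runs of strictly positive elements.
--     runs = []
--     cur = []
--     for x in arr:
--         if x > 0:
--             cur.append(x)
--         else:
--             if cur:
--                 runs.append(cur)
--             cur = []
--     if cur:
--         runs.append(cur)
--     # Phase 2: pick the run with maximum sum, ties broken by greater length.
--     best = (0, 0)  # (sum, length)
--     for r in runs:
--         cand = (sum(r), len(r))
--         if cand > best:
--             best = cand
--     return best[1]
-- ===== Notes on version B (the rewrite author's own statement) =====
-- stated objective: alternative
-- what changed: Replaced the online four-variable max-tracking index loop with a two-phase structure: group arr into maximal runs of positive elements, then reduce the run list by (sum, length) lexicographic maximum and return that run's length.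
import Mathlib
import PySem

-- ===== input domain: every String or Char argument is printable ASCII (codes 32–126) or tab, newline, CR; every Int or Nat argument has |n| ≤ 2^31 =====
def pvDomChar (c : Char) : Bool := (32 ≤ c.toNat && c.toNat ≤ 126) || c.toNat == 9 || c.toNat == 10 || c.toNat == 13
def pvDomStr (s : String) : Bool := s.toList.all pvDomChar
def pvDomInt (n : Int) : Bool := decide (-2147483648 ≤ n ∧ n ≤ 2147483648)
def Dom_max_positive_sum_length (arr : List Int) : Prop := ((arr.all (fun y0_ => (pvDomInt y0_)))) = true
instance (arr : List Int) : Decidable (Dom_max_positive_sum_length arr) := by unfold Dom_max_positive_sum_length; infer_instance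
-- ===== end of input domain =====

-- B groups arr into maximal positive runs and reduces them by (sum, length) lexicographic maximum; same cost, different structure.

-- ===== PORT A =====
-- loop body of A: state (max_sum, current_sum, max_len, current_len)
def pvStepA (st : Int × Int × Int × Int) (x : Int) : Int × Int × Int × Int :=
  if x > 0 then
    let cs := st.2.1 + x
    let cl := st.2.2.2 + 1
    if cs > st.1 then (cs, cs, cl, cl)
    else if cs = st.1 ∧ cl > st.2.2.1 then (st.1, cs, cl, cl)
    else (st.1, cs, st.2.2.1, cl)
  else (st.1, 0, st.2.2.1, 0)

def max_positive_sum_length (arr : List Int) : Int :=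
  ((PySem.List.pyRange 0 (arr.length : Int) 1).foldl
    (fun st i => pvStepA st (PySem.List.pyGetD arr i 0)) (0, 0, 0, 0)).2.2.1

-- ===== PORT B =====
-- run-building loop body of B: state (runs, cur)
def pvStepR (st : List (List Int) × List Int) (x : Int) : List (List Int) × List Int :=
  if x > 0 then (st.1, st.2 ++ [x])
  else if st.2 = [] then (st.1, []) else (st.1 ++ [st.2], [])

-- 'if cand > best: best = cand' on (sum, length) pairs (Python tuple comparison)
def pvBStep (b c : Int × Int) : Int × Int :=
  if b.1 < c.1 ∨ (b.1 = c.1 ∧ b.2 < c.2) then c else b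

def max_positive_sum_length_alt (arr : List Int) : Int :=
  let p := arr.foldl pvStepR ([], [])
  let runs := if p.2 = [] then p.1 else p.1 ++ [p.2]
  (runs.foldl (fun b r => pvBStep b (r.sum, (r.length : Int))) (0, 0)).2

-- ===== PRECONDITION & SPEC =====
def Spec_max_positive_sum_length (arr : List Int) (out : Int) : Prop := out = max_positive_sum_length_alt arr
instance (arr : List Int) (out : Int) : Decidable (Spec_max_positive_sum_length arr out) := by unfold Spec_max_positive_sum_length; infer_instance

-- ===== CLAIM (what is proved, stated in full; the proofs are below) =====
def Claim_equal_max_positive_sum_length : Prop := ∀ (arr : List Int), Dom_max_positive_sum_length arr → Spec_max_positive_sum_length arr (max_positive_sum_length arr)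

-- ===== LEMMAS AND PROOFS =====

-- structural description of B's run list, used only by the proofs
def pvRuns : List Int → List Int → List (List Int)
  | cur, [] => if cur = [] then [] else [cur]
  | cur, x :: xs =>
    if x > 0 then pvRuns (cur ++ [x]) xs
    else if cur = [] then pvRuns [] xs else cur :: pvRuns [] xs

theorem pvBStep_zero (b : Int × Int) (h1 : 0 ≤ b.1) (h2 : 0 ≤ b.2) : pvBStep b (0, 0) = b := by
  unfold pvBStep
  rw [if_neg]
  rintro (h | ⟨h, h'⟩) <;> omega

theorem pvBStep_nonneg (b c : Int × Int) (hb1 : 0 ≤ b.1) (hb2 : 0 ≤ b.2)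
    (hc1 : 0 ≤ c.1) (hc2 : 0 ≤ c.2) : 0 ≤ (pvBStep b c).1 ∧ 0 ≤ (pvBStep b c).2 := by
  unfold pvBStep; split <;> exact ⟨by assumption, by assumption⟩

theorem pvBStep_absorb (b c c' : Int × Int) (h : c.1 < c'.1) :
    pvBStep (pvBStep b c) c' = pvBStep b c' := by
  obtain ⟨b1, b2⟩ := b; obtain ⟨c1, c2⟩ := c; obtain ⟨d1, d2⟩ := c'
  simp only [pvBStep] at *
  split_ifs <;> first | rfl | omega

theorem pvStepA_pos (p : Int × Int) (cs cl x : Int) (hx : 0 < x) :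
    pvStepA (p.1, cs, p.2, cl) x =
      ((pvBStep p (cs + x, cl + 1)).1, cs + x, (pvBStep p (cs + x, cl + 1)).2, cl + 1) := by
  obtain ⟨m, l⟩ := p
  simp only [pvStepA, pvBStep, if_pos hx]
  split_ifs <;> simp [Prod.ext_iff] <;> omega

theorem pvStepA_nonpos (p : Int × Int) (cs cl x : Int) (hx : ¬ 0 < x) :
    pvStepA (p.1, cs, p.2, cl) x = (p.1, 0, p.2, 0) := by
  simp only [pvStepA, if_neg (by omega : ¬ x > 0)]

theorem pvSum_nonneg (cur : List Int) (h : ∀ x ∈ cur, 0 < x) : 0 ≤ cur.sum :=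
  List.sum_nonneg (fun x hx => le_of_lt (h x hx))

theorem pvMain (arr : List Int) : ∀ (cur : List Int) (b : Int × Int),
    (∀ x ∈ cur, 0 < x) → 0 ≤ b.1 → 0 ≤ b.2 →
    ((arr.foldl pvStepA ((pvBStep b (cur.sum, (cur.length : Int))).1, cur.sum,
        (pvBStep b (cur.sum, (cur.length : Int))).2, (cur.length : Int))).1,
     (arr.foldl pvStepA ((pvBStep b (cur.sum, (cur.length : Int))).1, cur.sum,
        (pvBStep b (cur.sum, (cur.length : Int))).2, (cur.length : Int))).2.2.1)
    = (pvRuns cur arr).foldl (fun acc r => pvBStep acc (r.sum, (r.length : Int))) b := by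
  induction arr with
  | nil =>
    intro cur b hpos hb1 hb2
    by_cases hc : cur = []
    · subst hc
      have e : pvBStep b (([] : List Int).sum, (([] : List Int).length : Int)) = b := by
        simpa using pvBStep_zero b hb1 hb2
      rw [e]
      simp [pvRuns]
    · simp only [List.foldl_nil, pvRuns, if_neg hc, List.foldl_cons]
  | cons x xs ih =>
    intro cur b hpos hb1 hb2
    by_cases hx : 0 < x
    · rw [List.foldl_cons,
        pvStepA_pos (pvBStep b (cur.sum, (cur.length : Int))) cur.sum (cur.length : Int) x hx,
        pvBStep_absorb b (cur.sum, (cur.length : Int)) (cur.sum + x, (cur.length : Int) + 1)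
          (by simp; omega)]
      have hsum : (cur ++ [x]).sum = cur.sum + x := by simp
      have hlen : ((cur ++ [x]).length : Int) = (cur.length : Int) + 1 := by simp
      have := ih (cur ++ [x]) b
        (by intro y hy; rcases List.mem_append.mp hy with h | h
            · exact hpos y h
            · simp at h; omega) hb1 hb2
      rw [hsum, hlen] at this
      rw [this]
      simp only [pvRuns, if_pos hx]
    · set b' := pvBStep b (cur.sum, (cur.length : Int)) with hb'
      have hcsum : 0 ≤ cur.sum := pvSum_nonneg cur hpos
      have hb'n : 0 ≤ b'.1 ∧ 0 ≤ b'.2 :=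
        pvBStep_nonneg b (cur.sum, (cur.length : Int)) hb1 hb2 hcsum (by positivity)
      rw [List.foldl_cons, pvStepA_nonpos b' cur.sum (cur.length : Int) x hx]
      have := ih [] b' (by simp) hb'n.1 hb'n.2
      simp only [List.sum_nil, List.length_nil, Nat.cast_zero] at this
      rw [pvBStep_zero b' hb'n.1 hb'n.2] at this
      rw [this]
      by_cases hc : cur = []
      · subst hc
        have e : b' = b := by
          rw [hb']; simpa using pvBStep_zero b hb1 hb2
        rw [e]
        simp [pvRuns, hx]
      · simp only [pvRuns, if_neg (by omega : ¬ x > 0), if_neg hc, List.foldl_cons]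
        rw [hb']

theorem pvRunsEq (arr : List Int) : ∀ (runs : List (List Int)) (cur : List Int),
    (if (arr.foldl pvStepR (runs, cur)).2 = [] then (arr.foldl pvStepR (runs, cur)).1
     else (arr.foldl pvStepR (runs, cur)).1 ++ [(arr.foldl pvStepR (runs, cur)).2])
    = runs ++ pvRuns cur arr := by
  induction arr with
  | nil =>
    intro runs cur
    by_cases hc : cur = []
    · subst hc; simp [pvRuns]
    · simp [pvRuns, hc]
  | cons x xs ih =>
    intro runs cur
    by_cases hx : 0 < x
    · rw [List.foldl_cons]
      have hstep : pvStepR (runs, cur) x = (runs, cur ++ [x]) := by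
        simp [pvStepR, hx]
      rw [hstep, ih runs (cur ++ [x])]
      simp only [pvRuns, if_pos hx]
    · rw [List.foldl_cons]
      by_cases hc : cur = []
      · have hstep : pvStepR (runs, cur) x = (runs, []) := by
          simp [pvStepR, hc, (by omega : ¬ x > 0)]
        rw [hstep, ih runs []]
        simp only [pvRuns, if_neg (by omega : ¬ x > 0), if_pos hc]
      · have hstep : pvStepR (runs, cur) x = (runs ++ [cur], []) := by
          simp [pvStepR, hc, (by omega : ¬ x > 0)]
        rw [hstep, ih (runs ++ [cur]) []]
        simp only [pvRuns, if_neg (by omega : ¬ x > 0), if_neg hc]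
        simp [List.append_assoc]

theorem pvAltEq (arr : List Int) :
    max_positive_sum_length_alt arr
      = ((pvRuns [] arr).foldl (fun acc r => pvBStep acc (r.sum, (r.length : Int))) (0, 0)).2 := by
  unfold max_positive_sum_length_alt
  have := pvRunsEq arr [] []
  simp only [List.nil_append] at this
  simp only [← this]

-- ===== VERDICT (by name: the statement is the Claim_ definition above) =====
theorem max_positive_sum_length_spec : Claim_equal_max_positive_sum_length := by
  intro arr _
  unfold Spec_max_positive_sum_length
  rw [pvAltEq]
  unfold max_positive_sum_length
  rw [PySem.List.foldl_pyRange_zero_pyGetD' arr 0 pvStepA (0, 0, 0, 0)]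
  have h := pvMain arr [] (0, 0) (by simp) (by norm_num) (by norm_num)
  simp only [List.sum_nil, List.length_nil, Nat.cast_zero] at h
  rw [show pvBStep (0, 0) (0, 0) = ((0 : Int), (0 : Int)) from rfl] at h
  exact congrArg Prod.snd h
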